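-- pv_equiv track=rewrite | github.com/didi64/Programmieren_ZTEL_23Ta | modules/increasing_sequences.py | increasing_seqs
-- ===== SOURCE A (Python) =====
-- def mini_seq(a, n, tot):
--     '''returns a sequence s=(a,...) of length n with sum(s) == tot
--        and s[:-1] strictly increasing
--     '''
--     s = tuple(range(a, a+n-1))
--     return s + (tot-sum(s),)
--
-- def find_index(seq):
--     '''it is assumed that seq is strictly increasing with
--        tot := sum(seq) of length n
--        if possible,
--        returns the largest i so that
--        (s_0,...,s_{i-1},s_i + 1) can be extended to a
--        strictly increasing sequence with the sum tot and length n
--     '''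
--     margin = 0
--     i = len(seq) - 2
--     while i >= 0 and margin < 2:
--         margin += (seq[i+1]-seq[i]-1)
--         i -= 1
--     return i+1 if margin > 1 else None
--
-- def increase(seq):
--     '''if possible,
--        returns the next strictly increasing sequence with
--        same sum and length
--     '''
--     if (i := find_index(seq)) is None:
--         return
--
--     x = seq[i]+1
--     head = seq[:i] + (x,)
--     tail = mini_seq(x+1, len(seq)-i-1, sum(seq)-sum(head))
--     return head + tail
--
-- def is_increasing(seq):
--     for i, x in enumerate(seq[:-1]):
--         if x >= seq[i+1]:
--             return False
--     return True
--
-- def increasing_seqs(n, tot, start=1):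
--     '''returns all increasing seqs of length n and sum tot'''
--     seq = mini_seq(start, n, tot)
--     if not is_increasing(seq):
--         return []
--
--     seqs = [seq]
--     while seq := increase(seq):
--         seqs.append(seq)
--     return seqs
-- ===== SOURCE B (Python) =====
-- # B: recursive backtracking enumerator instead of A's successor-function iteration.
-- def _enum(count, lo, rem):
--     if count <= 1:
--         return [(rem,)]
--     res = []
--     x = lo
--     while count * x + count * (count - 1) // 2 <= rem:
--         res += [(x,) + t for t in _enum(count - 1, x + 1, rem - x)]
--         x += 1
--     return res
--
-- def increasing_seqs(n, tot, start=1):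
--     '''returns all increasing seqs of length n and sum tot'''
--     return _enum(n, start, tot)
-- ===== Notes on version B (the rewrite author's own statement) =====
-- stated objective: alternative
-- what changed: A enumerates by repeatedly applying a lexicographic successor function (find_index/increase) starting from the minimal sequence; B is a recursive backtracking enumerator that picks each first element x in ascending order while a feasibility bound holds and recurses on (count-1, x+1, rem-x), producing the same lexicographically ordered list.
import Mathlib
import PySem

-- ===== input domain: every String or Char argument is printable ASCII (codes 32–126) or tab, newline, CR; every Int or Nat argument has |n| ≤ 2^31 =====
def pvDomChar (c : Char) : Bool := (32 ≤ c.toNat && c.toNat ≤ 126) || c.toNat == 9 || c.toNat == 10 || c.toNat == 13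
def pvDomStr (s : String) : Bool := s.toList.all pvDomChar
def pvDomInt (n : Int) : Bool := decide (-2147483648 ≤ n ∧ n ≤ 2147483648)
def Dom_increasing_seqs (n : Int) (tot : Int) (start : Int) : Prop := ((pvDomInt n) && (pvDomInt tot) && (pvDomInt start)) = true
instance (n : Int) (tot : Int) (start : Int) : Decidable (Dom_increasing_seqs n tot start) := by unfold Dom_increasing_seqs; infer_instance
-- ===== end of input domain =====

-- B re-implements A's successor-function enumeration as a recursive backtracking
-- enumerator over the first element; same return value, no speed claim.

-- ===== PORT A =====

-- termination-measure apparatus for A's `while seq := increase(seq)` loop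
-- (a lexicographic weight of the current sequence; not part of the algorithm):
def encNat (B : Nat) : List Nat → Nat
  | [] => 0
  | d :: ds => d * B ^ ds.length + encNat B ds

def Ubound (s : List Int) : Int := s.sum - ((s.length : Int) - 1) * s.headD 0

def Mbase (s : List Int) : Nat := (Ubound s - s.headD 0).toNat + 1

def Mmeas (s : List Int) : Nat := encNat (Mbase s) (s.map (fun v => (Ubound s - v).toNat))

def mini_seq (a : Int) (n : Int) (tot : Int) : List Int :=
  let s := PySem.List.pyRange a (a + n - 1) 1
  s ++ [tot - s.sum]

-- the while loop of find_index, on state (margin, i)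
def fiGo (seq : List Int) (margin : Int) (i : Int) : Int × Int :=
  if 0 ≤ i ∧ margin < 2 then
    fiGo seq (margin + (PySem.List.pyGetD seq (i + 1) 0 - PySem.List.pyGetD seq i 0 - 1)) (i - 1)
  else (margin, i)
termination_by (i + 1).toNat
decreasing_by omega

def find_index (seq : List Int) : Option Int :=
  let r := fiGo seq 0 ((seq.length : Int) - 2)
  if r.1 > 1 then some (r.2 + 1) else none

def increase (seq : List Int) : Option (List Int) :=
  match find_index seq with
  | none => none
  | some i =>
    let x := PySem.List.pyGetD seq i 0 + 1
    let head := PySem.List.slice seq none (some i) ++ [x]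
    let tail := mini_seq (x + 1) ((seq.length : Int) - i - 1) (seq.sum - head.sum)
    some (head ++ tail)

def is_increasing (seq : List Int) : Bool :=
  (PySem.List.enumerate (PySem.List.slice seq none (some (-1)))).all
    (fun p => !decide (PySem.List.pyGetD seq (p.1 + 1) 0 ≤ p.2))

-- the while loop of increasing_seqs, appending each successor (accumulator kept
-- reversed, reversed once at the end); the dite guard only makes the recursion
-- well-founded (it is proved below to hold whenever the loop is reached from
-- increasing_seqs, so the computation is the Python's)
def chainLoop (racc : List (List Int)) (s : List Int) : List (List Int) :=
  match increase s with
  | none => racc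
  | some s' => if h : Mmeas s' < Mmeas s then chainLoop (s' :: racc) s' else racc
termination_by Mmeas s
decreasing_by exact h

def increasing_seqs (n : Int) (tot : Int) (start : Int) : List (List Int) :=
  let seq := mini_seq start n tot
  if is_increasing seq = false then [] else (chainLoop [seq] seq).reverse

-- ===== PORT B =====

-- _enum(count, lo, rem): the while loop over x (here lo) is the second recursive call
def altEnum (count : Int) (lo : Int) (rem : Int) : List (List Int) :=
  if count ≤ 1 then [[rem]]
  else if count * lo + PySem.Int.floordiv (count * (count - 1)) 2 ≤ rem then
    ((altEnum (count - 1) (lo + 1) (rem - lo)).map (lo :: ·)) ++ altEnum count (lo + 1) rem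
  else []
termination_by (count.toNat, (rem + 1 - count * lo - PySem.Int.floordiv (count * (count - 1)) 2).toNat)
decreasing_by
  · apply Prod.Lex.left; omega
  · have h : count * (lo + 1) = count * lo + count := by ring
    apply Prod.Lex.right'
    · omega
    · omega

def increasing_seqs_alt (n : Int) (tot : Int) (start : Int) : List (List Int) :=
  altEnum n start tot

-- ===== PRECONDITION & SPEC =====
def Spec_increasing_seqs (n : Int) (tot : Int) (start : Int) (out : List (List Int)) : Prop := out = increasing_seqs_alt n tot start
instance (n : Int) (tot : Int) (start : Int) (out : List (List Int)) : Decidable (Spec_increasing_seqs n tot start out) := by unfold Spec_increasing_seqs; infer_instance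

-- ===== CLAIM (what is proved, stated in full; the proofs are below) =====
def Claim_equal_increasing_seqs : Prop := ∀ (n : Int) (tot : Int) (start : Int), Dom_increasing_seqs n tot start → Spec_increasing_seqs n tot start (increasing_seqs n tot start)

-- ===== LEMMAS AND PROOFS =====

-- notation shorthands for the proofs
lemma getLast!_eq (t : List Int) (h : t ≠ []) : t.getLast! = t.getLast h := by
  cases t with
  | nil => exact absurd rfl h
  | cons a as => rfl

def elt (t : List Int) (j : Int) : Int := PySem.List.pyGetD t j 0
def slk (t : List Int) (j : Int) : Int := t.getLast! - elt t j - ((t.length : Int) - 1 - j)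

-- ---- mini_seq facts ----
lemma mini_le_one (a n tot : Int) (h : n ≤ 1) : mini_seq a n tot = [tot] := by
  simp [mini_seq, PySem.List.pyRange_one_eq_nil (show a + n - 1 ≤ a by omega)]

lemma mini_cons (a n tot : Int) (h : 2 ≤ n) :
    mini_seq a n tot = a :: mini_seq (a + 1) (n - 1) (tot - a) := by
  have hb : a + 1 + (n - 1) - 1 = a + n - 1 := by ring
  simp only [mini_seq, hb, PySem.List.pyRange_one_cons (show a < a + n - 1 by omega),
    List.cons_append, List.sum_cons]
  congr 3
  ring

lemma mini_sum (a n tot : Int) : (mini_seq a n tot).sum = tot := by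
  simp [mini_seq]

lemma mini_length (a n tot : Int) (h : 2 ≤ n) : ((mini_seq a n tot).length : Int) = n := by
  simp [mini_seq, PySem.List.length_pyRange_one]
  omega

lemma pyRange_sum2 (a : Int) (k : Nat) :
    2 * (PySem.List.pyRange a (a + k) 1).sum = k * (2 * a + k - 1) := by
  induction k with
  | zero =>
    rw [PySem.List.pyRange_one_eq_nil (by simp)]
    simp
  | succ m ih =>
    have : (a : Int) + (m + 1 : Nat) = (a + m) + 1 := by push_cast; ring
    rw [this, PySem.List.pyRange_one_succ_right (show (a:Int) ≤ a + (m:Nat) by omega),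
      List.sum_append, List.sum_cons, List.sum_nil]
    push_cast
    push_cast at ih
    linear_combination ih

lemma pyRange_getLast (a b : Int) (h : a < b) :
    (PySem.List.pyRange a b 1).getLast? = some (b - 1) := by
  have hlen : (PySem.List.pyRange a b 1).length = (b - a).toNat := PySem.List.length_pyRange_one a b
  have hne : PySem.List.pyRange a b 1 ≠ [] := by
    intro hn; rw [hn] at hlen; simp at hlen; omega
  rw [List.getLast?_eq_getElem?, hlen]
  rw [List.getElem?_eq_getElem (by omega), PySem.List.getElem_pyRange_one]
  congr 1
  omega

lemma mini_chain_iff (a n tot : Int) (h : 2 ≤ n) :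
    List.IsChain (· < ·) (mini_seq a n tot) ↔ 2 * (n * a) + n * (n - 1) ≤ 2 * tot := by
  have hk : a + n - 1 = a + ((n - 1).toNat : Int) := by omega
  have hsum : 2 * (PySem.List.pyRange a (a + n - 1) 1).sum = (n - 1) * (2 * a + n - 2) := by
    rw [hk, pyRange_sum2]
    have : (((n - 1).toNat : Int)) = n - 1 := by omega
    rw [this]
    ring
  rw [mini_seq]
  rw [List.isChain_append]
  have hchain : List.IsChain (· < ·) (PySem.List.pyRange a (a + n - 1) 1) :=
    (PySem.List.pairwise_lt_pyRange_one a (a + n - 1)).isChain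
  have hgl := pyRange_getLast a (a + n - 1) (show a < a + n - 1 by omega)
  constructor
  · rintro ⟨-, -, hlt⟩
    have := hlt _ (by rw [hgl]; rfl) _ rfl
    simp only at this
    have hexp : (n-1)*(2*a+n-2) + 2*a + 2*n - 2 = 2*(n*a) + n*(n-1) := by ring
    linarith [hsum, hexp, this]
  · intro hle
    refine ⟨hchain, by simp, ?_⟩
    intro x hx y hy
    rw [hgl] at hx
    simp at hx hy
    subst hx; subst hy
    have hexp : (n-1)*(2*a+n-2) + 2*a + 2*n - 2 = 2*(n*a) + n*(n-1) := by ring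
    show a + n - 1 - 1 < tot - _
    linarith [hsum, hexp, hle]

lemma guard_iff (c lo rem : Int) :
    (c * lo + PySem.Int.floordiv (c * (c - 1)) 2 ≤ rem) ↔ 2 * (c * lo) + c * (c - 1) ≤ 2 * rem := by
  have heven : (2 : Int) ∣ c * (c - 1) := by
    rcases Int.even_or_odd c with he | ho
    · exact Dvd.dvd.mul_right he.two_dvd _
    · exact Dvd.dvd.mul_left (by obtain ⟨k, hk⟩ := ho; exact ⟨k, by omega⟩) _
  have hmod : PySem.Int.mod (c * (c - 1)) 2 = 0 := (PySem.Int.mod_eq_zero_iff_dvd _ _).mpr heven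
  have hdm := PySem.Int.floordiv_mul_add_mod (c * (c - 1)) 2
  rw [hmod] at hdm
  constructor <;> intro hh <;> linarith [hdm]

lemma getLast!_singleton (a : Int) : ([a] : List Int).getLast! = a := rfl

lemma getLast!_cons (a : Int) (t : List Int) (h : t ≠ []) :
    (a :: t).getLast! = t.getLast! := by
  rw [getLast!_eq _ (by simp), getLast!_eq _ h, List.getLast_cons h]

lemma is_increasing_iff (s : List Int) : is_increasing s = true ↔ List.IsChain (· < ·) s := by
  rw [is_increasing, PySem.List.slice_to_neg_one, List.all_eq_true, List.isChain_iff_getElem]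
  constructor
  · intro hall i hi
    have hmem : ((i : Int), s.dropLast[i]'(by simp; omega)) ∈
        PySem.List.enumerate s.dropLast 0 := by
      rw [PySem.List.mem_enumerate_iff]
      exact ⟨i, by simp; omega, by simp⟩
    have := hall _ hmem
    simp only [Bool.not_eq_eq_eq_not, Bool.not_true, decide_eq_false_iff_not, not_le] at this
    have hgd : PySem.List.pyGetD s ((i : Int) + 1) 0 = s[i + 1] := by
      have : ((i : Int) + 1) = ((i + 1 : Nat) : Int) := by push_cast; ring
      rw [this, PySem.List.pyGetD_natCast, List.getD_eq_getElem _ _ hi]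
    rw [hgd] at this
    simpa [List.getElem_dropLast] using this
  · intro hchain p hp
    rw [PySem.List.mem_enumerate_iff] at hp
    obtain ⟨k, hk, rfl⟩ := hp
    simp only [List.length_dropLast] at hk
    have hk1 : k + 1 < s.length := by omega
    have hgd : PySem.List.pyGetD s ((0 : Int) + (k : Int) + 1) 0 = s[k + 1] := by
      have : ((0 : Int) + (k : Int) + 1) = ((k + 1 : Nat) : Int) := by push_cast; ring
      rw [this, PySem.List.pyGetD_natCast, List.getD_eq_getElem _ _ hk1]
    simp only [Bool.not_eq_eq_eq_not, Bool.not_true, decide_eq_false_iff_not, not_le, hgd]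
    have := hchain k hk1
    simpa [List.getElem_dropLast] using this

-- ---- chain order facts ----
lemma chain_head_le (s : List Int) (hc : List.IsChain (· < ·) s) :
    ∀ x ∈ s, s.headD 0 ≤ x := by
  induction s with
  | nil => simp
  | cons a t ih =>
    intro x hx
    rcases List.mem_cons.mp hx with rfl | hxt
    · simp
    · cases t with
      | nil => simp at hxt
      | cons b u =>
        have hab : a < b := (List.isChain_cons_cons.mp hc).1
        have := ih (List.isChain_cons_cons.mp hc).2 x hxt
        simp at this ⊢
        omega

lemma chain_last (s : List Int) (hc : List.IsChain (· < ·) s) (hs : s ≠ []) :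
    s.headD 0 + ((s.length : Int) - 1) ≤ s.getLast! := by
  induction s with
  | nil => simp at hs
  | cons a t ih =>
    cases t with
    | nil => simp [getLast!_singleton]
    | cons b u =>
      have hab : a < b := (List.isChain_cons_cons.mp hc).1
      have := ih (List.isChain_cons_cons.mp hc).2 (by simp)
      rw [getLast!_cons a _ (by simp)]
      simp only [List.headD_cons, List.length_cons] at this ⊢
      push_cast at this ⊢
      omega

-- sum lower bound: twice the sum of a strictly increasing list
lemma sum_ge (s : List Int) (hc : List.IsChain (· < ·) s) (hs : s ≠ []) :
    2 * ((s.length : Int) * s.headD 0) + (s.length : Int) * ((s.length : Int) - 1)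
      + 2 * (s.getLast! - s.headD 0 - ((s.length : Int) - 1)) ≤ 2 * s.sum := by
  induction s with
  | nil => simp at hs
  | cons a t ih =>
    cases t with
    | nil => simp [getLast!_singleton]
    | cons b u =>
      have hab : a < b := (List.isChain_cons_cons.mp hc).1
      have hIH := ih (List.isChain_cons_cons.mp hc).2 (by simp)
      rw [getLast!_cons a _ (by simp)] at *
      simp only [List.headD_cons, List.length_cons, List.sum_cons] at hIH ⊢
      push_cast at hIH ⊢
      nlinarith [hIH, mul_nonneg (show (0:Int) ≤ (u.length : Int) by positivity)
        (show (0:Int) ≤ b - a - 1 by omega)]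

-- sum upper bound
lemma sum_le (s : List Int) (hc : List.IsChain (· < ·) s) (hs : s ≠ []) :
    2 * s.sum ≤ 2 * ((s.length : Int) * s.headD 0) + (s.length : Int) * ((s.length : Int) - 1)
      + 2 * ((s.length : Int) - 1) * (s.getLast! - s.headD 0 - ((s.length : Int) - 1)) := by
  induction s with
  | nil => simp at hs
  | cons a t ih =>
    cases t with
    | nil => simp [getLast!_singleton]
    | cons b u =>
      have hab : a < b := (List.isChain_cons_cons.mp hc).1
      have hc' := (List.isChain_cons_cons.mp hc).2
      have hIH := ih hc' (by simp)
      have hlast := chain_last (b :: u) hc' (by simp)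
      rw [getLast!_cons a _ (by simp)] at *
      simp only [List.headD_cons, List.length_cons, List.sum_cons] at hIH hlast ⊢
      push_cast at hIH hlast ⊢
      nlinarith [hIH, hlast]

-- ---- elt / slk facts ----
lemma elt_getElem (t : List Int) (j : Int) (h0 : 0 ≤ j) (h1 : j < (t.length : Int)) :
    elt t j = t[j.toNat]'(by omega) := by
  rw [elt, PySem.List.pyGetD_eq_getElem t 0 h0 (by exact_mod_cast h1)]

lemma elt_cons (x : Int) (t : List Int) (j : Int) (h0 : 0 ≤ j) :
    elt (x :: t) (j + 1) = elt t j := by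
  have h1 : j + 1 = ((j.toNat + 1 : Nat) : Int) := by omega
  have h2 : j = ((j.toNat : Nat) : Int) := by omega
  rw [elt, elt, h1, h2, PySem.List.pyGetD_natCast, PySem.List.pyGetD_natCast]
  rfl

lemma elt_zero (x : Int) (t : List Int) : elt (x :: t) 0 = x := by
  rw [elt, PySem.List.pyGetD_zero_cons]

lemma slk_antitone (t : List Int) (hc : List.IsChain (· < ·) t) (j j' : Int)
    (h0 : 0 ≤ j) (h1 : j ≤ j') (h2 : j' ≤ (t.length : Int) - 1) :
    slk t j' ≤ slk t j := by
  have hstep : ∀ (j : Int), 0 ≤ j → j + 1 ≤ (t.length : Int) - 1 → slk t (j + 1) ≤ slk t j := by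
    intro j hj0 hj1
    have hlt := List.isChain_iff_getElem.mp hc j.toNat (by omega)
    rw [slk, slk, elt_getElem t j hj0 (by omega), elt_getElem t (j + 1) (by omega) (by omega)]
    have hidx : (j + 1).toNat = j.toNat + 1 := by omega
    have hgetEq : t[(j + 1).toNat]'(by omega) = t[j.toNat + 1]'(by omega) := by
      congr 1
    omega
  obtain ⟨k, hk⟩ : ∃ k : Nat, j' = j + k := ⟨(j' - j).toNat, by omega⟩
  subst hk
  clear h1
  induction k with
  | zero => simp
  | succ m ihm =>
    have h1 : j + (m : Int) + 1 ≤ (t.length : Int) - 1 := by push_cast at h2 ⊢; omega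
    calc slk t (j + ((m + 1 : Nat) : Int)) = slk t ((j + m) + 1) := by push_cast; ring_nf
    _ ≤ slk t (j + (m : Int)) := hstep _ (by omega) h1
    _ ≤ slk t j := ihm (by omega)

-- ---- find_index characterisation ----
lemma fiGo_spec (t : List Int) (i m : Int) (h1 : -1 ≤ i) (h2 : i ≤ (t.length : Int) - 2)
    (hm : m < 2) :
    (fiGo t m i = (m + elt t (i + 1) - elt t 0 - (i + 1), -1) ∧
      (0 ≤ i → m + elt t (i + 1) - elt t 0 - (i + 1) - (elt t 1 - elt t 0 - 1) < 2))
  ∨ (∃ p, 0 ≤ p ∧ p ≤ i ∧ fiGo t m i = (m + elt t (i + 1) - elt t p - (i + 1 - p), p - 1) ∧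
      2 ≤ m + elt t (i + 1) - elt t p - (i + 1 - p) ∧
      m + elt t (i + 1) - elt t (p + 1) - (i - p) < 2) := by
  have helt : ∀ j, PySem.List.pyGetD t j 0 = elt t j := fun _ => rfl
  obtain ⟨k, hk⟩ : ∃ k : Nat, i = (k : Int) - 1 := ⟨(i + 1).toNat, by omega⟩
  induction k generalizing i m with
  | zero =>
    have hi : i = -1 := by omega
    subst hi
    left
    rw [fiGo, if_neg (by omega)]
    refine ⟨?_, by omega⟩
    rw [Prod.mk.injEq]
    constructor
    · have : (-1 : Int) + 1 = 0 := by ring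
      rw [this]; ring
    · rfl
  | succ k ihk =>
    have hi0 : 0 ≤ i := by omega
    rw [fiGo, if_pos ⟨hi0, hm⟩, helt, helt]
    by_cases hg : m + (elt t (i + 1) - elt t i - 1) < 2
    · have hrec := ihk (i - 1) (m + (elt t (i + 1) - elt t i - 1)) (by omega) (by omega) hg
        (by omega)
      simp only [show i - 1 + 1 = i from by ring] at hrec
      rcases hrec with ⟨heq, hcl⟩ | ⟨p, hp0, hpi, heq, hge, hlt⟩
      · left
        rw [heq]
        constructor
        · rw [Prod.mk.injEq]; exact ⟨by ring, rfl⟩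
        · intro _hi0
          by_cases hi1 : 1 ≤ i
          · have := hcl (by omega)
            omega
          · have hieq : i = 0 := by omega
            subst hieq
            simp only [show (0:Int) + 1 = 1 from by ring] at *
            omega
      · right
        refine ⟨p, hp0, by omega, ?_, by omega, by omega⟩
        rw [heq, Prod.mk.injEq]
        exact ⟨by ring, rfl⟩
    · right
      refine ⟨i, hi0, le_refl i, ?_, by omega, ?_⟩
      · rw [fiGo, if_neg (by omega), Prod.mk.injEq]
        exact ⟨by ring, rfl⟩
      · simp only [show i - i = 0 from by ring]
        omega

lemma elt_last (t : List Int) (h : t ≠ []) : elt t ((t.length : Int) - 1) = t.getLast! := by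
  have hl : 0 < t.length := List.length_pos_iff.mpr h
  rw [elt_getElem t _ (by omega) (by omega), getLast!_eq _ h, List.getLast_eq_getElem]
  congr 1
  omega

lemma getLastD_eq (t : List Int) (h : t ≠ []) : t.getLast?.getD 0 = t.getLast! := by
  cases t with
  | nil => exact absurd rfl h
  | cons a u => rw [getLast!_eq _ h, List.getLast?_eq_getLast h]; rfl

lemma fi_none_iff (t : List Int) (hc : List.IsChain (· < ·) t) (hq : t ≠ []) :
    find_index t = none ↔ slk t 0 ≤ 1 := by
  have hq1 : 1 ≤ (t.length : Int) := by
    have := List.length_pos_iff.mpr hq; omega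
  have hspec := fiGo_spec t ((t.length : Int) - 2) 0 (by omega) (le_refl _) (by norm_num)
  simp only [show (t.length : Int) - 2 + 1 = (t.length : Int) - 1 from by ring] at hspec
  rw [elt_last t hq] at hspec
  simp only [find_index]
  rcases hspec with ⟨heq, _⟩ | ⟨p, hp0, hpi, heq, hge, _⟩
  · rw [heq]
    simp only [slk]
    have hgd := getLastD_eq t hq
    constructor
    · intro hnone
      by_contra hgt
      rw [if_pos (by omega)] at hnone
      exact absurd hnone (by simp)
    · intro hle
      rw [if_neg (by omega)]
  · rw [heq]
    have hslkp : slk t p = t.getLast! - elt t p - ((t.length : Int) - 1 - p) := rfl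
    have hanti := slk_antitone t hc 0 p (le_refl 0) hp0 (by omega)
    rw [if_pos (by omega)]
    simp only [slk] at hanti ⊢
    have hgd := getLastD_eq t hq
    constructor
    · intro hcon; exact absurd hcon (by simp)
    · intro hle; exfalso; omega

lemma fi_some_fwd (t : List Int) (hc : List.IsChain (· < ·) t) (hq : t ≠ []) (p : Int)
    (h : find_index t = some p) :
    0 ≤ p ∧ p ≤ (t.length : Int) - 2 ∧ 2 ≤ slk t p ∧ slk t (p + 1) ≤ 1 := by
  have hq1 : 1 ≤ (t.length : Int) := by
    have := List.length_pos_iff.mpr hq; omega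
  have hspec := fiGo_spec t ((t.length : Int) - 2) 0 (by omega) (le_refl _) (by norm_num)
  simp only [show (t.length : Int) - 2 + 1 = (t.length : Int) - 1 from by ring] at hspec
  rw [elt_last t hq] at hspec
  simp only [find_index] at h
  rcases hspec with ⟨heq, hcl⟩ | ⟨p', hp0, hpi, heq, hge, hlt⟩
  · rw [heq] at h
    by_cases hgt : 0 + t.getLast! - elt t 0 - ((t.length : Int) - 1) > 1
    · rw [if_pos hgt] at h
      have hp : p = 0 := by
        have := Option.some_injective _ h.symm
        omega
      subst hp
      have hq2 : 2 ≤ (t.length : Int) := by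
        by_contra hq2
        have h1 : (t.length : Int) - 1 = 0 := by omega
        rw [← elt_last t hq, h1] at hgt
        omega
      have hcl2 := hcl (by omega)
      refine ⟨le_refl 0, by omega, ?_, ?_⟩
      · simp only [slk]; omega
      · simp only [slk, zero_add]; omega
    · rw [if_neg hgt] at h
      exact absurd h (by simp)
  · rw [heq] at h
    rw [if_pos (by omega)] at h
    have hp : p = p' := by
      have := Option.some_injective _ h
      omega
    subst hp
    refine ⟨hp0, by omega, ?_, ?_⟩
    · simp only [slk]; omega
    · simp only [slk]; omega

lemma fi_some_iff (t : List Int) (hc : List.IsChain (· < ·) t) (hq : t ≠ []) (p : Int) :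
    find_index t = some p ↔ (0 ≤ p ∧ p ≤ (t.length : Int) - 2 ∧ 2 ≤ slk t p ∧ slk t (p + 1) ≤ 1) := by
  constructor
  · exact fi_some_fwd t hc hq p
  · rintro ⟨hp0, hp2, hge, hle⟩
    match hfi : find_index t with
    | none =>
      have := (fi_none_iff t hc hq).mp hfi
      have := slk_antitone t hc 0 p (le_refl 0) hp0 (by omega)
      omega
    | some p' =>
      obtain ⟨hp0', hp2', hge', hle'⟩ := fi_some_fwd t hc hq p' hfi
      congr 1
      by_contra hne
      rcases lt_or_gt_of_ne (fun hh => hne hh.symm) with hlt | hgt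
      · have := slk_antitone t hc (p + 1) p' (by omega) (by omega) (by omega)
        omega
      · have := slk_antitone t hc (p' + 1) p (by omega) (by omega) (by omega)
        omega

-- ---- list helpers ----
lemma headD_eq_getElem (v : List Int) (h : v ≠ []) :
    v.headD 0 = v[0]'(List.length_pos_iff.mpr h) := by
  cases v with
  | nil => exact absurd rfl h
  | cons a w => rfl

lemma headD_take (s : List Int) (k : Nat) (hk : 1 ≤ k) :
    (s.take k).headD 0 = s.headD 0 := by
  cases s with
  | nil => simp
  | cons a w =>
    cases k with
    | zero => omega
    | succ k' => rfl

lemma headD_cons_tail (v : List Int) (h : v ≠ []) : v.headD 0 :: v.tail = v := by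
  cases v with
  | nil => exact absurd rfl h
  | cons a w => rfl

lemma getLast!_append (l r : List Int) (hr : r ≠ []) : (l ++ r).getLast! = r.getLast! := by
  induction l with
  | nil => rfl
  | cons a u ih =>
    rw [List.cons_append, getLast!_cons a (u ++ r) (by simp [hr]), ih]

lemma getLast!_drop (s : List Int) (k : Nat) (hk : k < s.length) :
    (s.drop k).getLast! = s.getLast! := by
  conv_rhs => rw [← List.take_append_drop k s]
  rw [getLast!_append _ _ (by rw [← List.length_pos_iff]; simp; omega)]

lemma take_getLast? (s : List Int) (k : Nat) (h1 : 1 ≤ k) (h2 : k ≤ s.length) :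
    (s.take k).getLast? = some (s[k-1]'(by omega)) := by
  rw [List.getLast?_eq_getElem?, List.getElem?_take]
  have hlen : (s.take k).length = k := by simp; omega
  rw [hlen, if_pos (by omega), List.getElem?_eq_getElem (by omega)]

-- ---- digit encoding facts (for the loop measure) ----
lemma enc_append (B : Nat) (u l : List Nat) :
    encNat B (u ++ l) = encNat B u * B ^ l.length + encNat B l := by
  induction u with
  | nil => simp [encNat]
  | cons d r ih =>
    simp only [List.cons_append, encNat, ih, List.length_append]
    rw [pow_add]
    ring

lemma enc_lt (B : Nat) (ds : List Nat) (h : ∀ d ∈ ds, d < B) : encNat B ds < B ^ ds.length := by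
  induction ds with
  | nil => simp [encNat]
  | cons d r ih =>
    have hd : d < B := h d (by simp)
    have hr : encNat B r < B ^ r.length := ih (fun e he => h e (by simp [he]))
    simp only [encNat, List.length_cons, pow_succ]
    calc d * B ^ r.length + encNat B r < d * B ^ r.length + B ^ r.length := by omega
    _ = (d + 1) * B ^ r.length := by ring
    _ ≤ B * B ^ r.length := Nat.mul_le_mul_right _ (by omega)
    _ = B ^ r.length * B := by ring

lemma enc_strict (B : Nat) (d d' : Nat) (r r' : List Nat) (hlen : r'.length = r.length)
    (hdd : d' < d) (hb : ∀ e ∈ r', e < B) : encNat B (d' :: r') < encNat B (d :: r) := by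
  have h1 : encNat B r' < B ^ r.length := hlen ▸ enc_lt B r' hb
  simp only [encNat, hlen]
  calc d' * B ^ r.length + encNat B r' < d' * B ^ r.length + B ^ r.length := by omega
  _ = (d' + 1) * B ^ r.length := by ring
  _ ≤ d * B ^ r.length := Nat.mul_le_mul_right _ (by omega)
  _ ≤ d * B ^ r.length + encNat B r := by omega

-- the sum bound that justifies bumping position p
lemma bump_sum (v : List Int) (hcv : List.IsChain (· < ·) v) (h2 : 2 ≤ (v.length : Int))
    (hslack : 2 ≤ v.getLast! - v.headD 0 - ((v.length : Int) - 1))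
    (hgap : v.tail.headD 0 ≥ v.headD 0 + 2) :
    2 * ((v.length : Int) * (v.headD 0 + 1)) + (v.length : Int) * ((v.length : Int) - 1) ≤ 2 * v.sum := by
  cases v with
  | nil => simp at h2
  | cons a w =>
    have hw : w ≠ [] := by
      intro hn; subst hn; norm_num at h2
    have hcw : List.IsChain (· < ·) w := hcv.tail
    have hge := sum_ge w hcw hw
    have hlast : (a :: w).getLast! = w.getLast! := getLast!_cons a w hw
    have hlw := chain_last w hcw hw
    simp only [List.headD_cons, List.tail_cons, List.length_cons, List.sum_cons] at *
    rw [hlast] at hslack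
    push_cast at *
    nlinarith [hge, hslack, hgap, hlw,
      mul_nonneg (show (0:Int) ≤ (w.length : Int) - 1 by omega)
        (show (0:Int) ≤ w.headD 0 - a - 2 by omega)]

-- ---- increase: shape and preservation ----
lemma increase_some (s : List Int) (p : Int) (hfi : find_index s = some p)
    (hp : 0 ≤ p) (hp2 : p ≤ (s.length : Int) - 2) :
    increase s = some (s.take p.toNat ++ mini_seq (elt s p + 1) ((s.length : Int) - p) ((s.drop p.toNat).sum)) := by
  have hx : PySem.List.pyGetD s p 0 = elt s p := rfl
  simp only [increase, hfi, hx]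
  rw [PySem.List.slice_to s hp]
  rw [mini_cons (elt s p + 1) ((s.length : Int) - p) _ (by omega)]
  have hsum : s.sum = (s.take p.toNat).sum + (s.drop p.toNat).sum := by
    conv_lhs => rw [← List.take_append_drop p.toNat s]
    rw [List.sum_append]
  simp only [List.sum_append, List.sum_cons, List.sum_nil]
  have htot : s.sum - ((List.take p.toNat s).sum + (elt s p + 1 + 0)) =
      (List.drop p.toNat s).sum - (elt s p + 1) := by omega
  rw [htot, List.append_assoc]
  rfl

lemma increase_facts (s s' : List Int) (hc : List.IsChain (· < ·) s) (h : increase s = some s') :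
    List.IsChain (· < ·) s' ∧ s'.sum = s.sum ∧ s'.length = s.length ∧
      s.headD 0 ≤ s'.headD 0 ∧ Mmeas s' < Mmeas s := by
  obtain ⟨p, hfi⟩ : ∃ p, find_index s = some p := by
    cases hfis : find_index s with
    | none => rw [increase, hfis] at h; exact absurd h (by simp)
    | some p => exact ⟨p, rfl⟩
  have hsne : s ≠ [] := by
    intro hn
    subst hn
    have hnone : find_index ([] : List Int) = none := by
      rw [find_index, fiGo]
      norm_num
    rw [hnone] at hfi
    exact absurd hfi (by simp)
  obtain ⟨hp0, hp2, hslkp, hslkp1⟩ := fi_some_fwd s hc hsne p hfi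
  simp only [slk] at hslkp hslkp1
  have hq2 : 2 ≤ (s.length : Int) := by omega
  have hinc := increase_some s p hfi hp0 hp2
  rw [h] at hinc
  have hs' : s' = s.take p.toNat ++ mini_seq (elt s p + 1) ((s.length : Int) - p) ((s.drop p.toNat).sum) :=
    Option.some_injective _ hinc
  set q : Int := (s.length : Int) with hqdef
  set v : List Int := s.drop p.toNat with hvdef
  set u : List Int := s.take p.toNat with hudef
  set m : Int := q - p with hmdef
  have hm2 : 2 ≤ m := by omega
  have hlenv : (v.length : Int) = m := by
    rw [hvdef, List.length_drop]; push_cast; omega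
  have hvne : v ≠ [] := by
    rw [← List.length_pos_iff]; omega
  have hv0 : v.headD 0 = elt s p := by
    rw [headD_eq_getElem v hvne, elt_getElem s p hp0 (by omega)]
    simp only [hvdef]
    simp [List.getElem_drop]
  have hvlast : v.getLast! = s.getLast! := getLast!_drop s p.toNat (by omega)
  have hcv : List.IsChain (· < ·) v := hc.suffix (List.drop_suffix _ _)
  have hvtne : v.tail ≠ [] := by
    rw [← List.length_pos_iff, List.length_tail]; omega
  have hvt : v.tail.headD 0 = elt s (p + 1) := by
    rw [headD_eq_getElem v.tail hvtne, elt_getElem s (p + 1) (by omega) (by omega)]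
    simp only [hvdef]
    simp [List.getElem_tail, List.getElem_drop]
    congr 1
    omega
  have hgap : v.tail.headD 0 ≥ v.headD 0 + 2 := by
    rw [hvt, hv0]; omega
  have hbs := bump_sum v hcv (by omega) (by rw [hvlast, hv0]; omega) hgap
  rw [hlenv, hv0] at hbs
  have hminichain : List.IsChain (· < ·) (mini_seq (elt s p + 1) m v.sum) :=
    (mini_chain_iff _ _ _ hm2).mpr hbs
  have hminidec : mini_seq (elt s p + 1) m v.sum =
      (elt s p + 1) :: mini_seq (elt s p + 2) (m - 1) (v.sum - (elt s p + 1)) := by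
    rw [mini_cons _ _ _ hm2]
    congr 1
    ring_nf
  have hchain' : List.IsChain (· < ·) s' := by
    rw [hs']
    refine List.isChain_append.mpr ⟨hc.prefix (List.take_prefix _ _), hminichain, ?_⟩
    intro x hx y hy
    rw [hminidec] at hy
    simp only [List.head?_cons, Option.mem_def, Option.some.injEq] at hy
    subst hy
    rcases Nat.eq_zero_or_pos p.toNat with hpz | hppos
    · rw [hudef, hpz] at hx; simp at hx
    · rw [hudef, take_getLast? s p.toNat (by omega) (by omega)] at hx
      simp only [Option.mem_def, Option.some.injEq] at hx
      subst hx
      have hlt := List.isChain_iff_getElem.mp hc (p.toNat - 1) (by omega)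
      have hpe : s[p.toNat - 1 + 1]'(by omega) = elt s p := by
        rw [elt_getElem s p hp0 (by omega)]
        congr 1
        omega
      rw [hpe] at hlt
      omega
  have hsum' : s'.sum = s.sum := by
    rw [hs', List.sum_append, mini_sum]
    conv_rhs => rw [← List.take_append_drop p.toNat s, List.sum_append]
  have hlenmini : ((mini_seq (elt s p + 1) m v.sum).length : Int) = m := mini_length _ _ _ hm2
  have hlen' : s'.length = s.length := by
    have : (s'.length : Int) = (s.length : Int) := by
      rw [hs', List.length_append]
      push_cast
      rw [show ((mini_seq (elt s p + 1) m v.sum).length : Int) = m from hlenmini]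
      rw [hudef, List.length_take]
      push_cast
      omega
    exact_mod_cast this
  have hhead' : s.headD 0 ≤ s'.headD 0 ∧
      (1 ≤ p → s'.headD 0 = s.headD 0) ∧ (p = 0 → s'.headD 0 = s.headD 0 + 1) := by
    rcases Nat.eq_zero_or_pos p.toNat with hpz | hppos
    · have hpz' : p = 0 := by omega
      have hu : u = [] := by rw [hudef, hpz]; simp
      have hve : v = s := by rw [hvdef, hpz]; simp
      have h0 : elt s 0 = s.headD 0 := by
        rw [elt_getElem s 0 (le_refl 0) (by omega), headD_eq_getElem s hsne]
        rfl
      rw [hs', hu, List.nil_append, hminidec, hpz']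
      simp only [List.headD_cons, h0]
      exact ⟨by omega, fun hcon => absurd hcon (by norm_num), fun _ => trivial⟩
    · have hp1 : 1 ≤ p := by omega
      have hsh : s'.headD 0 = s.headD 0 := by
        rw [hs']
        have hune : u ≠ [] := by
          rw [hudef, ← List.length_pos_iff, List.length_take]
          omega
        cases hud : u with
        | nil => exact absurd hud hune
        | cons a u' =>
          have : a = s.headD 0 := by
            have := headD_take s p.toNat (by omega)
            rw [← hudef, hud] at this
            simpa using this
          simp [this]
      exact ⟨le_of_eq hsh.symm, fun _ => hsh, fun hpc => by omega⟩
  refine ⟨hchain', hsum', hlen', hhead'.1, ?_⟩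
  -- the measure decreases
  have hfmem : ∀ x ∈ s', s'.headD 0 ≤ x := chain_head_le s' hchain'
  have hlastle : s.getLast! ≤ Ubound s := by
    have hge := sum_ge s hc hsne
    have hl := chain_last s hc hsne
    rw [Ubound]
    nlinarith [hge, hl, hq2]
  have hv0lt : elt s p + 3 ≤ s.getLast! := by omega
  rcases Nat.eq_zero_or_pos p.toNat with hpz | hppos
  · -- p = 0 : the head digit base changes
    have hpz' : p = 0 := by omega
    have hu : u = [] := by rw [hudef, hpz]; simp
    have hve : v = s := by rw [hvdef, hpz]; simp
    have h0 : elt s 0 = s.headD 0 := by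
      rw [elt_getElem s 0 (le_refl 0) (by omega), headD_eq_getElem s hsne]
      rfl
    set hh : Int := s.headD 0 with hhdef
    set U : Int := Ubound s with hUdef
    have hUh : 2 ≤ 2 * (U - hh) := by
      have hge := sum_ge s hc hsne
      have hl := chain_last s hc hsne
      rw [hUdef, Ubound]
      nlinarith [hge, hl, hq2]
    set N : Nat := s.length with hNdef
    have hU' : Ubound s' = U - (q - 1) := by
      rw [Ubound, hsum', hlen', hUdef, Ubound]
      have : s'.headD 0 = hh + 1 := hhead'.2.2 hpz'
      rw [this]
      ring
    have hh' : s'.headD 0 = hh + 1 := hhead'.2.2 hpz'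
    have hB : (Mbase s : Int) = U - hh + 1 := by
      rw [Mbase, ← hUdef, ← hhdef]
      push_cast
      omega
    -- bound Mmeas s' above
    have hdig' : ∀ d ∈ s'.map (fun x => (Ubound s' - x).toNat), d < Mbase s' := by
      intro d hd
      rw [List.mem_map] at hd
      obtain ⟨x, hxmem, rfl⟩ := hd
      have := hfmem x hxmem
      rw [Mbase]
      omega
    have hup : Mmeas s' < Mbase s' ^ N := by
      have := enc_lt (Mbase s') (s'.map (fun x => (Ubound s' - x).toNat)) hdig'
      rw [Mmeas]
      simpa [hlen', ← hNdef] using this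
    -- bound Mmeas s below
    have hlow : (Mbase s - 1) * Mbase s ^ (N - 1) ≤ Mmeas s := by
      cases hsd : s with
      | nil => exact absurd hsd hsne
      | cons a t =>
        have ha : a = hh := by rw [hhdef, hsd]; rfl
        have hfa : (Ubound (a :: t) - a).toNat = Mbase (a :: t) - 1 := by
          rw [← hsd, ha, hhdef]
          simp only [Mbase]
          omega
        rw [Mmeas, List.map_cons, encNat, hfa]
        have hlt : t.length = N - 1 := by
          rw [hNdef, hsd]
          simp
        rw [List.length_map, hlt, ← hsd]
        omega
    -- compare the bounds
    have hbase : Mbase s' ^ N ≤ (Mbase s - 1) * Mbase s ^ (N - 1) := by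
      have hB1 : 2 ≤ Mbase s := by rw [Mbase]; omega
      have hNq : (N : Int) = q := by rw [hNdef]
      have hN2 : 2 ≤ N := by omega
      have hBval : (Mbase s' : Int) = max (U - hh - q + 1) 1 := by
        rw [Mbase, hU', hh']
        rcases le_or_gt (U - hh - q) 0 with hle | hgt
        · rw [max_eq_right (by omega)]
          have : (U - (q - 1) - (hh + 1)) = U - hh - q := by ring
          rw [this]
          omega
        · rw [max_eq_left (by omega)]
          have : (U - (q - 1) - (hh + 1)) = U - hh - q := by ring
          rw [this]
          omega
      have hstep1 : Mbase s' ≤ Mbase s - 1 := by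
        have : (Mbase s' : Int) ≤ (Mbase s : Int) - 1 := by
          rw [hBval, hB]
          rcases max_cases (U - hh - q + 1) 1 with ⟨heq, -⟩ | ⟨heq, -⟩ <;> rw [heq] <;> omega
        omega
      calc Mbase s' ^ N ≤ (Mbase s - 1) ^ N := Nat.pow_le_pow_left hstep1 N
      _ = (Mbase s - 1) * (Mbase s - 1) ^ (N - 1) := by
        conv_lhs => rw [show N = 1 + (N - 1) from by omega]
        rw [pow_add, pow_one]
      _ ≤ (Mbase s - 1) * Mbase s ^ (N - 1) :=
        Nat.mul_le_mul_left _ (Nat.pow_le_pow_left (by omega) _)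
    omega
  · -- 1 ≤ p : base and prefix unchanged, digit at p drops
    have hp1 : 1 ≤ p := by omega
    have hsh : s'.headD 0 = s.headD 0 := hhead'.2.1 hp1
    have hU : Ubound s' = Ubound s := by
      rw [Ubound, Ubound, hsum', hlen', hsh]
    have hBeq : Mbase s' = Mbase s := by
      rw [Mbase, Mbase, hU, hsh]
    set U : Int := Ubound s with hUdef
    set B : Nat := Mbase s with hBdef
    set f : Int → Nat := fun x => (U - x).toNat with hfdef
    have hvdec : v.headD 0 :: v.tail = v := headD_cons_tail v hvne
    have hsdec : s = u ++ v := by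
      rw [hudef, hvdef]
      exact (List.take_append_drop p.toNat s).symm
    have hmap1 : s'.map f = u.map f ++ (f (elt s p + 1) ::
        (mini_seq (elt s p + 2) (m - 1) (v.sum - (elt s p + 1))).map f) := by
      rw [hs', hminidec, List.map_append, List.map_cons]
    have hmap2 : s.map f = u.map f ++ (f (elt s p) :: v.tail.map f) := by
      conv_lhs => rw [hsdec, List.map_append]
      congr 1
      conv_lhs => rw [← hvdec, List.map_cons, hv0]
    have hlen12 : ((mini_seq (elt s p + 2) (m - 1) (v.sum - (elt s p + 1))).map f).length =
        (v.tail.map f).length := by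
      rw [List.length_map, List.length_map, List.length_tail]
      have h1 : ((mini_seq (elt s p + 1) m v.sum).length : Int) = m := hlenmini
      rw [hminidec] at h1
      simp only [List.length_cons] at h1
      omega
    have hddlt : f (elt s p + 1) < f (elt s p) := by
      rw [hfdef]
      simp only []
      omega
    have hdigs : ∀ e ∈ (mini_seq (elt s p + 2) (m - 1) (v.sum - (elt s p + 1))).map f, e < B := by
      intro e he
      rw [List.mem_map] at he
      obtain ⟨x, hxmem, rfl⟩ := he
      have hxs' : x ∈ s' := by
        rw [hs', hminidec]
        exact List.mem_append_right _ (List.mem_cons_of_mem _ hxmem)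
      have := hfmem x hxs'
      rw [hsh] at this
      rw [hfdef, hBdef, Mbase, ← hUdef]
      simp only []
      omega
    have henc := enc_strict B (f (elt s p)) (f (elt s p + 1)) (v.tail.map f)
      ((mini_seq (elt s p + 2) (m - 1) (v.sum - (elt s p + 1))).map f) hlen12 hddlt hdigs
    rw [Mmeas, Mmeas, hBeq, hU, ← hBdef, ← hfdef, hmap1, hmap2, enc_append, enc_append]
    have hlex : (f (elt s p + 1) ::
        (mini_seq (elt s p + 2) (m - 1) (v.sum - (elt s p + 1))).map f).length =
        (f (elt s p) :: v.tail.map f).length := by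
      simp only [List.length_cons, hlen12]
    rw [hlex]
    omega

-- ---- the successor chain as a straight (proof-side) recursion, and
-- ---- its relation to the accumulating loop of the port ----
def chainA (s : List Int) : List (List Int) :=
  s :: (match increase s with
        | none => []
        | some s' => if h : Mmeas s' < Mmeas s then chainA s' else [])
termination_by Mmeas s
decreasing_by exact h

lemma chainA_cons (s : List Int) : ∃ r, chainA s = s :: r := ⟨_, by rw [chainA]⟩

lemma chainLoop_eq_aux : ∀ (N : Nat) (racc : List (List Int)) (s : List Int), Mmeas s ≤ N →
    chainLoop racc s = ((chainA s).tail).reverse ++ racc := by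
  intro N
  induction N using Nat.strong_induction_on with
  | _ N ih =>
    intro racc s hM
    rw [chainLoop, chainA]
    cases hinc : increase s with
    | none => simp
    | some s' =>
      dsimp only
      by_cases hm : Mmeas s' < Mmeas s
      · rw [dif_pos hm, dif_pos hm, ih (Mmeas s') (by omega) (s' :: racc) s' (le_refl _)]
        obtain ⟨r, hr⟩ := chainA_cons s'
        rw [hr]
        simp
      · rw [dif_neg hm, dif_neg hm]
        simp

lemma increasing_seqs_eq (n tot start : Int)
    (h : is_increasing (mini_seq start n tot) = true) :
    increasing_seqs n tot start = chainA (mini_seq start n tot) := by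
  simp only [increasing_seqs, h]
  norm_num
  rw [chainLoop_eq_aux (Mmeas (mini_seq start n tot)) _ _ (le_refl _)]
  obtain ⟨r, hr⟩ := chainA_cons (mini_seq start n tot)
  rw [hr]
  simp

-- ---- chainA unfolding ----
lemma chainA_none (s : List Int) (h : increase s = none) : chainA s = [s] := by
  rw [chainA, h]

lemma chainA_some (s s' : List Int) (hc : List.IsChain (· < ·) s) (h : increase s = some s') :
    chainA s = s :: chainA s' := by
  rw [chainA, h]
  simp only [dif_pos ((increase_facts s s' hc h).2.2.2.2)]

-- ---- the block decomposition of the successor chain ----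
lemma elt0_headD (t : List Int) (ht : t ≠ []) : elt t 0 = t.headD 0 := by
  rw [elt_getElem t 0 (le_refl 0) (by rw [← List.length_pos_iff] at ht; omega),
    headD_eq_getElem t ht]
  rfl

lemma slk_cons (x : Int) (t : List Int) (ht : t ≠ []) (j : Int) (h0 : 0 ≤ j) :
    slk (x :: t) (j + 1) = slk t j := by
  rw [slk, slk, getLast!_cons x t ht, elt_cons x t j h0]
  simp only [List.length_cons]
  push_cast
  ring_nf

lemma slk_cons_zero (x : Int) (t : List Int) (ht : t ≠ []) :
    slk (x :: t) 0 = t.getLast! - x - (t.length : Int) := by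
  rw [slk, getLast!_cons x t ht, elt_zero]
  simp only [List.length_cons]
  push_cast
  ring_nf

lemma isChain_cons_iff (x : Int) (t : List Int) (ht : t ≠ []) :
    List.IsChain (· < ·) (x :: t) ↔ x < t.headD 0 ∧ List.IsChain (· < ·) t := by
  conv_lhs => rw [← headD_cons_tail t ht]
  rw [List.isChain_cons_cons]
  constructor
  · rintro ⟨h1, h2⟩
    refine ⟨h1, ?_⟩
    rw [← headD_cons_tail t ht]
    exact h2
  · rintro ⟨h1, h2⟩
    refine ⟨h1, ?_⟩
    rw [headD_cons_tail t ht]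
    exact h2

lemma increase_cons (x : Int) (t t' : List Int) (ht : t ≠ []) (j : Int) (hj0 : 0 ≤ j)
    (hj2 : j ≤ (t.length : Int) - 2) (hfit : find_index t = some j)
    (hfixt : find_index (x :: t) = some (j + 1)) (ht' : increase t = some t') :
    increase (x :: t) = some (x :: t') := by
  have ht'' : t' = t.take j.toNat ++ mini_seq (elt t j + 1) ((t.length : Int) - j) ((t.drop j.toNat).sum) := by
    rw [increase_some t j hfit hj0 hj2] at ht'
    exact Option.some_injective _ ht'.symm
  rw [increase_some (x :: t) (j + 1) hfixt (by omega)
    (by simp only [List.length_cons]; push_cast; omega)]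
  congr 1
  have hj1 : (j + 1).toNat = j.toNat + 1 := by omega
  rw [hj1, List.take_succ_cons, List.drop_succ_cons, elt_cons x t j hj0]
  have harg : ((x :: t).length : Int) - (j + 1) = (t.length : Int) - j := by
    simp only [List.length_cons]
    push_cast
    ring
  rw [harg, ht'']
  rfl

lemma increase_bump (x : Int) (t : List Int) (ht : t ≠ [])
    (hfixt : find_index (x :: t) = some 0) :
    increase (x :: t) = some (mini_seq (x + 1) ((t.length : Int) + 1) (x + t.sum)) := by
  have hq1 : 1 ≤ (t.length : Int) := by rw [← List.length_pos_iff] at ht; omega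
  rw [increase_some (x :: t) 0 hfixt (le_refl 0)
    (by simp only [List.length_cons]; push_cast; omega)]
  congr 1
  simp only [Int.toNat_zero, List.take_zero, List.drop_zero, List.nil_append, elt_zero,
    List.sum_cons, List.length_cons]
  norm_num

lemma increase_none_of_fi (s : List Int) (h : find_index s = none) : increase s = none := by
  rw [increase, h]

lemma chain_block_aux : ∀ (N : Nat) (x : Int) (t : List Int), Mmeas (x :: t) ≤ N →
    List.IsChain (· < ·) (x :: t) → t ≠ [] →
    chainA (x :: t) = (chainA t).map (x :: ·) ++
      (if 2 * (((t.length : Int) + 1) * (x + 1)) + ((t.length : Int) + 1) * (t.length : Int) ≤ 2 * (x + t.sum)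
       then chainA (mini_seq (x + 1) ((t.length : Int) + 1) (x + t.sum)) else []) := by
  intro N
  induction N using Nat.strong_induction_on with
  | _ N ih =>
    intro x t hM hc ht
    have hct : List.IsChain (· < ·) t := hc.tail
    have hxh : x < t.headD 0 := ((isChain_cons_iff x t ht).mp hc).1
    have hq1 : 1 ≤ (t.length : Int) := by rw [← List.length_pos_iff] at ht; omega
    have hxtne : (x :: t) ≠ [] := by simp
    have hl0 : elt t 0 = t.headD 0 := elt0_headD t ht
    have hsig0 : t.headD 0 + ((t.length : Int) - 1) ≤ t.getLast! := chain_last t hct ht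
    cases hfit : find_index t with
    | some j =>
      obtain ⟨hj0, hj2, hsjge, hsjle⟩ := fi_some_fwd t hct ht j hfit
      obtain ⟨t', hit⟩ : ∃ t', increase t = some t' := by
        rw [increase, hfit]
        exact ⟨_, rfl⟩
      obtain ⟨hct', hsum', hlen', hhead', hMlt'⟩ := increase_facts t t' hct hit
      have hfixt : find_index (x :: t) = some (j + 1) := by
        rw [fi_some_iff (x :: t) hc hxtne (j + 1)]
        refine ⟨by omega, by simp only [List.length_cons]; push_cast; omega, ?_, ?_⟩
        · rw [slk_cons x t ht j hj0]; exact hsjge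
        · rw [slk_cons x t ht (j + 1) (by omega)]; exact hsjle
      have hixt : increase (x :: t) = some (x :: t') := increase_cons x t t' ht j hj0 hj2 hfit hfixt hit
      obtain ⟨hcxt', hsumxt', hlenxt', hheadxt', hMltxt'⟩ := increase_facts (x :: t) (x :: t') hc hixt
      have ht'ne : t' ≠ [] := by
        rw [← List.length_pos_iff, hlen']
        rw [← List.length_pos_iff] at ht
        exact ht
      have hstep1 : chainA (x :: t) = (x :: t) :: chainA (x :: t') := chainA_some _ _ hc hixt
      have hstep2 : chainA t = t :: chainA t' := chainA_some _ _ hct hit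
      have hIH := ih (Mmeas (x :: t')) (by omega) x t' (le_refl _) hcxt' ht'ne
      rw [hlen', hsum'] at hIH
      rw [hstep1, hstep2, hIH, List.map_cons]
      simp [List.cons_append]
    | none =>
      have hslk0 : slk t 0 ≤ 1 := (fi_none_iff t hct ht).mp hfit
      rw [slk, hl0] at hslk0
      have hstep2 : chainA t = [t] := chainA_none t (increase_none_of_fi t hfit)
      have hsge := sum_ge t hct ht
      have hsle := sum_le t hct ht
      by_cases hbump : 2 ≤ t.getLast! - x - (t.length : Int)
      · have hfixt : find_index (x :: t) = some 0 := by
          rw [fi_some_iff (x :: t) hc hxtne 0]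
          refine ⟨le_refl 0, by simp only [List.length_cons]; push_cast; omega, ?_, ?_⟩
          · rw [slk_cons_zero x t ht]; omega
          · rw [show (0:Int) + 1 = 0 + 1 from rfl, slk_cons x t ht 0 (le_refl 0), slk, hl0]
            omega
        have hixt := increase_bump x t ht hfixt
        have hcmini := (increase_facts (x :: t) _ hc hixt).1
        have hstep1 : chainA (x :: t) =
            (x :: t) :: chainA (mini_seq (x + 1) ((t.length : Int) + 1) (x + t.sum)) :=
          chainA_some _ _ hc hixt
        have hcond : 2 * (((t.length : Int) + 1) * (x + 1)) + ((t.length : Int) + 1) * (t.length : Int) ≤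
            2 * (x + t.sum) := by
          nlinarith [hsge, hslk0, hbump, hsig0, hxh,
            mul_nonneg (show (0:Int) ≤ (t.length : Int) - 1 by omega)
              (show (0:Int) ≤ 1 - (t.getLast! - t.headD 0 - ((t.length : Int) - 1)) by omega)]
        rw [hstep1, hstep2, if_pos hcond]
        simp [List.map_cons]
      · have hfixt : find_index (x :: t) = none := by
          rw [fi_none_iff (x :: t) hc hxtne, slk_cons_zero x t ht]
          omega
        have hstep1 : chainA (x :: t) = [x :: t] :=
          chainA_none _ (increase_none_of_fi _ hfixt)
        have hcond : ¬ (2 * (((t.length : Int) + 1) * (x + 1)) + ((t.length : Int) + 1) * (t.length : Int) ≤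
            2 * (x + t.sum)) := by
          intro hcon
          nlinarith [hsle, hslk0, hbump, hsig0, hxh,
            mul_nonneg (show (0:Int) ≤ (t.length : Int) - 1 by omega)
              (show (0:Int) ≤ t.getLast! - t.headD 0 - ((t.length : Int) - 1) by omega)]
        rw [hstep1, hstep2, if_neg hcond]
        simp

lemma chain_block (x : Int) (t : List Int) (hc : List.IsChain (· < ·) (x :: t)) (ht : t ≠ []) :
    chainA (x :: t) = (chainA t).map (x :: ·) ++
      (if 2 * (((t.length : Int) + 1) * (x + 1)) + ((t.length : Int) + 1) * (t.length : Int) ≤ 2 * (x + t.sum)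
       then chainA (mini_seq (x + 1) ((t.length : Int) + 1) (x + t.sum)) else []) := by
  exact chain_block_aux (Mmeas (x :: t)) x t (le_refl _) hc ht

-- ---- main ----
lemma mini_ne_nil (a n tot : Int) : mini_seq a n tot ≠ [] := by
  simp [mini_seq]

lemma mini_length' (a k tot : Int) (h : 1 ≤ k) : ((mini_seq a k tot).length : Int) = k := by
  by_cases hk : k ≤ 1
  · have : k = 1 := by omega
    subst this
    rw [mini_le_one a 1 tot (le_refl 1)]
    rfl
  · exact mini_length a k tot (by omega)


lemma fi_singleton (v : Int) : find_index [v] = none := by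
  rw [find_index, fiGo]
  norm_num

lemma main_eq (n start tot : Int) : increasing_seqs n tot start = altEnum n start tot := by
  induction n, start, tot using altEnum.induct with
  | case1 count lo rem h1 =>
    have hmini : mini_seq lo count rem = [rem] := mini_le_one lo count rem h1
    have hinc : is_increasing [rem] = true :=
      (is_increasing_iff [rem]).mpr (by simp)
    rw [altEnum, if_pos h1]
    rw [show increasing_seqs count rem lo = chainA (mini_seq lo count rem) from
      increasing_seqs_eq count rem lo (by rw [hmini]; exact hinc), hmini]
    first
    | exact chainA_none [rem] (increase_none_of_fi [rem] (fi_singleton rem))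
    | rfl
  | case2 count lo rem h1 h2 ih1 ih2 =>
    have hn2 : 2 ≤ count := by omega
    have hG1 : 2 * (count * lo) + count * (count - 1) ≤ 2 * rem := (guard_iff count lo rem).mp h2
    have hchain : List.IsChain (· < ·) (mini_seq lo count rem) :=
      (mini_chain_iff lo count rem hn2).mpr hG1
    have hdec : mini_seq lo count rem = lo :: mini_seq (lo + 1) (count - 1) (rem - lo) :=
      mini_cons lo count rem hn2
    set T : List Int := mini_seq (lo + 1) (count - 1) (rem - lo) with hTdef
    have hTne : T ≠ [] := mini_ne_nil _ _ _
    have hTlen : (T.length : Int) = count - 1 := mini_length' _ _ _ (by omega)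
    have hTsum : T.sum = rem - lo := mini_sum _ _ _
    have hchainT : List.IsChain (· < ·) T := by
      have := hchain
      rw [hdec] at this
      exact this.tail
    have hTinc : is_increasing T = true := (is_increasing_iff T).mpr hchainT
    have hminT : is_increasing (mini_seq lo count rem) = true :=
      (is_increasing_iff _).mpr hchain
    have hAstep : increasing_seqs count rem lo = chainA (lo :: T) := by
      rw [increasing_seqs_eq count rem lo hminT, hdec]
    have hblock := chain_block lo T (hdec ▸ hchain) hTne
    have hTsum2 : lo + T.sum = rem := by rw [hTsum]; ring
    have hTlen2 : (T.length : Int) + 1 = count := by omega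
    rw [hTlen2, hTlen, hTsum2] at hblock
    have hchainAT : chainA T = increasing_seqs (count - 1) (rem - lo) (lo + 1) := by
      rw [increasing_seqs_eq (count - 1) (rem - lo) (lo + 1) (by rw [← hTdef]; exact hTinc)]
    have hifpart : (if 2 * (count * (lo + 1)) + count * (count - 1) ≤ 2 * rem
        then chainA (mini_seq (lo + 1) count rem) else []) = altEnum count (lo + 1) rem := by
      by_cases hcb : 2 * (count * (lo + 1)) + count * (count - 1) ≤ 2 * rem
      · rw [if_pos hcb]
        have hchain2 : List.IsChain (· < ·) (mini_seq (lo + 1) count rem) :=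
          (mini_chain_iff (lo + 1) count rem hn2).mpr hcb
        have hinc2 : is_increasing (mini_seq (lo + 1) count rem) = true :=
          (is_increasing_iff _).mpr hchain2
        have : chainA (mini_seq (lo + 1) count rem) = increasing_seqs count rem (lo + 1) :=
          (increasing_seqs_eq count rem (lo + 1) hinc2).symm
        rw [this, ih2]
      · rw [if_neg hcb]
        rw [altEnum, if_neg (by omega), if_neg (by rw [guard_iff]; exact hcb)]
    rw [hAstep, hblock, hchainAT, ih1, hifpart]
    conv_rhs => rw [altEnum, if_neg (by omega), if_pos h2]
  | case3 count lo rem h1 h2 =>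
    have hn2 : 2 ≤ count := by omega
    have hG1 : ¬ (2 * (count * lo) + count * (count - 1) ≤ 2 * rem) := by
      rw [← guard_iff]; exact h2
    have hnc : ¬ List.IsChain (· < ·) (mini_seq lo count rem) := by
      rw [mini_chain_iff lo count rem hn2]
      exact hG1
    have hfalse : is_increasing (mini_seq lo count rem) = false := by
      rcases Bool.eq_false_or_eq_true (is_increasing (mini_seq lo count rem)) with h | h
      · exact absurd ((is_increasing_iff _).mp h) hnc
      · exact h
    rw [altEnum, if_neg h1, if_neg h2]
    simp [increasing_seqs, hfalse]

-- ===== VERDICT (by name: the statement is the Claim_ definition above) =====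
theorem increasing_seqs_spec : Claim_equal_increasing_seqs := by
  intro n tot start _
  unfold Spec_increasing_seqs increasing_seqs_alt
  exact main_eq n start tot
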